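-- pv_equiv track=rewrite | github.com/kevinfra/Algo3-tp1 | src/graficarEj2.py | moda
-- ===== SOURCE A (Python) =====
-- def moda(list):
--   res = []
--   k = 0
--   while k < len(list):
--     actual = list[k:k+49]
--     actual.sort()
--     repeticiones = 0
--     for i in actual:
--       apariciones = actual.count(i)
--       if apariciones > repeticiones:
--           repeticiones = apariciones
--     modas = []
--     for i in actual:
--       apariciones = actual.count(i)
--       if apariciones == repeticiones and i not in modas:
--           modas.append(i)
--     k += 50
--     res.append(modas)
--   return res
-- ===== SOURCE B (Python) =====
-- def moda(list):
--   res = []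
--   for k in range(0, len(list), 50):
--     counts = {}
--     for v in list[k:k+49]:
--       counts[v] = counts.get(v, 0) + 1
--     mx = max(counts.values())
--     res.append(sorted(v for v, c in counts.items() if c == mx))
--   return res
-- ===== Notes on version B (the rewrite author's own statement) =====
-- stated objective: faster
-- what changed: Each 49-element chunk's modes are computed with a single-pass frequency dictionary (build counts once, take max of the values, sort the keys that attain it) instead of sorting the chunk and rescanning it with .count for every element in two passes.
import Mathlib
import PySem

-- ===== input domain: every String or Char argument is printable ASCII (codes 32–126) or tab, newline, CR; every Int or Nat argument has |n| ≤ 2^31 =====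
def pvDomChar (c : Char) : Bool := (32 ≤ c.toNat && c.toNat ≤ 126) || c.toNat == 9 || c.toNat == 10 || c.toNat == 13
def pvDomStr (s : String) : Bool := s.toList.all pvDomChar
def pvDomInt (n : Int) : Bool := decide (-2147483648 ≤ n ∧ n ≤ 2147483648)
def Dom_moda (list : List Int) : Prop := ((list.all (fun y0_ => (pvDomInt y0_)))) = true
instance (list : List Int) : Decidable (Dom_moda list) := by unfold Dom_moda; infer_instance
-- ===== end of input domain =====

-- B replaces A's sort-and-rescan mode computation per 49-element chunk by a single
-- counting pass over the chunk (frequency dict, max of values, sorted keys attaining it);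
-- measurably faster by a constant factor.


-- ===== PORT A =====
-- the body of A's while loop: sort the chunk, find the max multiplicity by rescanning
-- with .count for every element, collect (deduplicated, in chunk-sorted order) the
-- elements attaining it
def modaBody (c : List Int) : List Int :=
  let actual := PySem.List.sorted c (fun x => x)
  let repeticiones := actual.foldl
    (fun repeticiones i =>
      if PySem.List.count actual i > repeticiones then PySem.List.count actual i
      else repeticiones) 0
  actual.foldl
    (fun modas i =>
      if PySem.List.count actual i = repeticiones ∧ i ∉ modas then modas ++ [i] else modas)
    []

def modaLoop (list : List Int) (k : Nat) (res : List (List Int)) : List (List Int) :=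
  if h : (k : Int) < PySem.List.len list then
    modaLoop list (k + 50)
      (res ++ [modaBody (PySem.List.slice list (some (k : Int)) (some ((k : Int) + 49)))])
  else res
termination_by list.length - k
decreasing_by
  simp only [PySem.List.len_eq] at h
  have : k < list.length := by exact_mod_cast h
  omega

def moda (list : List Int) : List (List Int) := modaLoop list 0 []

-- ===== PORT B =====
-- the body of B's for loop: build the frequency dict in one pass, take the max count,
-- return the sorted keys that attain it.  (mx's `.getD 0` is never consulted: every
-- chunk this is applied to is nonempty, so the dict has at least one value.)
def modaAltBody (chunk : List Int) : List Int :=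
  let counts : PySem.Dict Int Int :=
    chunk.foldl (fun d v => d.insert v (d.getD v 0 + 1)) PySem.Dict.empty
  let mx := (PySem.List.max? (PySem.Dict.values counts) (fun x => x)).getD 0
  PySem.List.sorted
    (((PySem.Dict.items counts).filter (fun p => p.2 == mx)).map (fun p => p.1))
    (fun x => x)

def moda_alt (list : List Int) : List (List Int) :=
  (PySem.List.pyRange 0 (PySem.List.len list) 50).foldl
    (fun res k => res ++ [modaAltBody (PySem.List.slice list (some k) (some (k + 49)))])
    []

-- ===== PRECONDITION & SPEC =====
def Spec_moda (list : List Int) (out : List (List Int)) : Prop := out = moda_alt list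
instance (list : List Int) (out : List (List Int)) : Decidable (Spec_moda list out) := by unfold Spec_moda; infer_instance

-- ===== CLAIM (what is proved, stated in full; the proofs are below) =====
def Claim_equal_moda : Prop := ∀ (list : List Int), Dom_moda list → Spec_moda list (moda list)

-- ===== LEMMAS AND PROOFS =====

-- pyRange with the literal step 50, as a cons-recurrence
lemma pyRange50_nil (a b : Int) (h : b ≤ a) : PySem.List.pyRange a b 50 = [] := by
  rw [PySem.List.pyRange_of_pos a b (by norm_num)]
  rw [if_neg (by omega)]
  simp

lemma pyRange50_cons (a b : Int) (h : a < b) :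
    PySem.List.pyRange a b 50 = a :: PySem.List.pyRange (a + 50) b 50 := by
  rw [PySem.List.pyRange_of_pos a b (by norm_num),
      PySem.List.pyRange_of_pos (a + 50) b (by norm_num)]
  rw [if_pos h]
  have hN : ((b - a + 50 - 1) / 50).toNat
      = (if a + 50 < b then ((b - (a + 50) + 50 - 1) / 50).toNat else 0) + 1 := by
    split_ifs with h2 <;> omega
  rw [hN]
  rw [List.range_succ_eq_map]
  simp only [List.map_cons, List.map_map]
  refine congrArg₂ List.cons (by push_cast; ring) ?_
  refine List.map_congr_left ?_
  intro x _
  simp only [Function.comp_apply]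
  push_cast
  ring

-- a fold of `max` over a projection is attained (or is the initial value)
lemma foldl_max_attained (l : List Int) (f : Int → Nat) :
    ∀ a : Nat, l.foldl (fun r i => max r (f i)) a = a ∨
      ∃ x ∈ l, l.foldl (fun r i => max r (f i)) a = f x := by
  induction l with
  | nil => intro a; left; rfl
  | cons y t ih =>
      intro a
      rcases ih (max a (f y)) with h | ⟨x, hx, hfx⟩
      · rcases Nat.le_total a (f y) with hle | hle
        · right; exact ⟨y, by simp, by simpa [Nat.max_eq_right hle] using h⟩
        · left; simpa [Nat.max_eq_left hle] using h
      · right; exact ⟨x, by simp [hx], by simpa using hfx⟩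

lemma sublist_ofList (xs : List Int) : (PySem.Set.ofList xs).Sublist xs := by
  induction xs with
  | nil => simp [PySem.Set.ofList_nil]
  | cons x t ih =>
      rw [PySem.Set.ofList_cons]
      refine List.Sublist.cons₂ x ?_
      have hd : (PySem.Set.ofList t).discard x
          = (PySem.Set.ofList t).filter (fun y => !(y == x)) := by
        simp [PySem.Set.discard]
      rw [hd]
      exact List.Sublist.trans List.filter_sublist ih

-- the central fact: on a nonempty chunk the two loop bodies agree
lemma body_eq (c : List Int) (hc : c ≠ []) : modaBody c = modaAltBody c := by
  set actual := PySem.List.sorted c (fun x => x) with hactual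
  have hperm : actual.Perm c := PySem.List.sorted_perm c (fun x => x) false
  have hcount : ∀ x, PySem.List.count actual x = List.count x c := by
    intro x
    rw [PySem.List.count_eq]
    exact hperm.count_eq x
  have hmem : ∀ x : Int, x ∈ actual ↔ x ∈ c := fun x => hperm.mem_iff
  -- A's first loop is a running max
  have hrep_fold :
      actual.foldl (fun repeticiones i =>
        if PySem.List.count actual i > repeticiones then PySem.List.count actual i
        else repeticiones) 0
      = actual.foldl (fun r i => max r (PySem.List.count actual i)) 0 := by
    refine PySem.List.foldl_congr_mem actual _ _ 0 ?_
    intro r x _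
    rw [Nat.max_def]
    split_ifs <;> omega
  set rep := actual.foldl (fun r i => max r (PySem.List.count actual i)) 0 with hrepdef
  have hrep_bound : ∀ x ∈ actual, PySem.List.count actual x ≤ rep :=
    (PySem.List.le_foldl_max_nat actual (fun i => PySem.List.count actual i) 0).2
  -- A's second loop is an ordered deduplicating filter
  have hmodas :
      actual.foldl (fun modas i =>
        if PySem.List.count actual i = rep ∧ i ∉ modas then modas ++ [i] else modas) []
      = PySem.Set.ofList
          (actual.filter (fun i => decide (PySem.List.count actual i = rep))) := by
    have hbody : actual.foldl (fun modas i =>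
        if PySem.List.count actual i = rep ∧ i ∉ modas then modas ++ [i] else modas) []
        = actual.foldl (fun modas i =>
            if PySem.List.count actual i = rep then PySem.Set.add modas i else modas) [] := by
      refine PySem.List.foldl_congr_mem actual _ _ [] ?_
      intro acc x _
      rw [PySem.Set.add_eq_ite]
      by_cases hp : PySem.List.count actual x = rep
      · by_cases hin : x ∈ acc
        · rw [if_pos hp, if_pos hin, if_neg (by tauto)]
        · rw [if_pos hp, if_neg hin, if_pos ⟨hp, hin⟩]
      · rw [if_neg hp, if_neg (by tauto)]
    rw [hbody, PySem.List.foldl_ite_eq_foldl_filter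
          (fun i => PySem.List.count actual i = rep) PySem.Set.add actual [],
        ← PySem.Set.ofList_eq_foldl]
  set modas := PySem.Set.ofList
      (actual.filter (fun i => decide (PySem.List.count actual i = rep))) with hmodasdef
  -- B's dict is the counter of the chunk
  have hcounter :
      c.foldl (fun d v => d.insert v (d.getD v 0 + 1)) PySem.Dict.empty
        = PySem.Dict.counter c :=
    PySem.Dict.foldl_insert_getD_add_one_eq_counter c
  have hvalues : (PySem.Dict.counter c).values
      = (PySem.Set.ofList c).map (fun k => ((List.count k c : Int))) := by
    rw [PySem.Dict.values_eq_map_keys _ (PySem.Dict.nodup_keys_counter c) 0,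
        PySem.Dict.keys_counter]
    exact List.map_congr_left (fun k _ => PySem.Dict.getD_counter c k)
  -- the max of the values exists and equals A's rep
  have hofne : PySem.Set.ofList c ≠ [] := by
    obtain ⟨x, hx⟩ := List.exists_mem_of_ne_nil c hc
    intro habs
    have : x ∈ PySem.Set.ofList c := (PySem.Set.mem_ofList c x).mpr hx
    simp [habs] at this
  have hvne : (PySem.Dict.counter c).values ≠ [] := by
    rw [hvalues]; simpa using hofne
  obtain ⟨m, hm⟩ : ∃ m, PySem.List.max? (PySem.Dict.counter c).values (fun x => x) = some m := by
    rcases h : PySem.List.max? (PySem.Dict.counter c).values (fun x => x) with _ | m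
    · exact absurd ((PySem.List.max?_eq_none_iff _ _).mp h) hvne
    · exact ⟨m, rfl⟩
  have hm_mem : m ∈ (PySem.Dict.counter c).values := PySem.List.max?_mem hm
  have hm_max : ∀ v ∈ (PySem.Dict.counter c).values, v ≤ m := by
    intro v hv; exact PySem.List.max?_isMax hm v hv
  obtain ⟨k0, hk0c, hk0⟩ : ∃ k0, k0 ∈ c ∧ m = (List.count k0 c : Int) := by
    rw [hvalues] at hm_mem
    obtain ⟨k0, hk0, hval⟩ := List.mem_map.mp hm_mem
    exact ⟨k0, (PySem.Set.mem_ofList c k0).mp hk0, hval.symm⟩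
  have hcount_le_m : ∀ x ∈ c, (List.count x c : Int) ≤ m := by
    intro x hx
    refine hm_max _ ?_
    rw [hvalues]
    exact List.mem_map.mpr ⟨x, (PySem.Set.mem_ofList c x).mpr hx, rfl⟩
  have hrep_m : (rep : Int) = m := by
    have h1 : m ≤ (rep : Int) := by
      rw [hk0]
      have := hrep_bound k0 ((hmem k0).mpr hk0c)
      rw [hcount k0] at this
      exact_mod_cast this
    have h2 : (rep : Int) ≤ m := by
      rcases foldl_max_attained actual (fun i => PySem.List.count actual i) 0 with h0 | ⟨x, hxa, hx⟩
      · rw [← hrepdef] at h0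
        rw [h0, hk0]
        positivity
      · rw [← hrepdef] at hx
        rw [hx]
        have hxc := (hmem x).mp hxa
        have := hcount_le_m x hxc
        rw [← hcount x] at this
        exact this
    exact le_antisymm h2 h1
  -- B's filtered key list
  have hitems : ((PySem.Dict.counter c).items.filter (fun p => p.2 == m)).map
      (fun p : Int × Int => p.1)
      = (PySem.Set.ofList c).filter (fun k => ((List.count k c : Int)) == m) := by
    rw [PySem.Dict.items_counter, List.filter_map, List.map_map]
    simp [Function.comp_def]
  -- membership in modas and in the filtered key list agrees
  have hmem_modas : ∀ x, x ∈ modas ↔ x ∈ c ∧ (List.count x c : Int) = m := by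
    intro x
    rw [hmodasdef, PySem.Set.mem_ofList, List.mem_filter]
    constructor
    · rintro ⟨hxa, hcnt⟩
      have hcnt' : PySem.List.count actual x = rep := by simpa using hcnt
      refine ⟨(hmem x).mp hxa, ?_⟩
      rw [← hcount x, hcnt', hrep_m]
    · rintro ⟨hxc, hcnt⟩
      refine ⟨(hmem x).mpr hxc, ?_⟩
      have hcnt' : PySem.List.count actual x = rep := by
        have : (PySem.List.count actual x : Int) = (rep : Int) := by
          rw [hcount x, hcnt, hrep_m]
        exact_mod_cast this
      simpa using hcnt'
  have hmem_F : ∀ x, (x ∈ (PySem.Set.ofList c).filter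
        (fun k => ((List.count k c : Int)) == m))
      ↔ x ∈ c ∧ (List.count x c : Int) = m := by
    intro x
    rw [List.mem_filter, PySem.Set.mem_ofList]
    simp
  -- modas is nodup and strictly increasing
  have hnodup_modas : modas.Nodup := PySem.Set.nodup_ofList _
  have hsl : modas.Sublist actual := by
    rw [hmodasdef]
    exact List.Sublist.trans (sublist_ofList _) List.filter_sublist
  have hpwle : modas.Pairwise (fun a b : Int => a ≤ b) :=
    (PySem.List.sorted_pairwise c (fun x => x)).sublist hsl
  have hpwlt : modas.Pairwise (fun a b : Int => a < b) :=
    (hpwle.and hnodup_modas).imp (fun h => lt_of_le_of_ne h.1 h.2)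
  -- the permutation
  have hnodup_F : ((PySem.Set.ofList c).filter
      (fun k => ((List.count k c : Int)) == m)).Nodup :=
    (PySem.Set.nodup_ofList c).filter _
  have hpermF : modas.Perm
      ((PySem.Set.ofList c).filter (fun k => ((List.count k c : Int)) == m)) := by
    rw [List.perm_ext_iff_of_nodup hnodup_modas hnodup_F]
    intro x
    rw [hmem_modas x, hmem_F x]
  -- assemble the two sides
  have hA : modaBody c = modas := by
    simp only [modaBody]
    rw [← hactual, hrep_fold]
    exact hmodas
  have hB : modaAltBody c
      = PySem.List.sorted
          (((PySem.Dict.counter c).items.filter (fun p => p.2 == m)).map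
            (fun p : Int × Int => p.1)) (fun x => x) := by
    simp only [modaAltBody]
    simp only [hcounter, hm, Option.getD_some]
  rw [hA, hB, hitems]
  exact (PySem.List.sorted_eq_of_perm_of_pairwise_lt _ _ _ hpermF hpwlt).symm

lemma loop_eq (list : List Int) : ∀ (k : Nat) (res : List (List Int)),
    modaLoop list k res
      = res ++ (PySem.List.pyRange (k : Int) (list.length : Int) 50).map
          (fun j => modaBody (PySem.List.slice list (some j) (some (j + 49)))) := by
  suffices H : ∀ (n k : Nat) (res : List (List Int)), list.length - k ≤ n →
      modaLoop list k res
        = res ++ (PySem.List.pyRange (k : Int) (list.length : Int) 50).map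
            (fun j => modaBody (PySem.List.slice list (some j) (some (j + 49)))) by
    intro k res; exact H (list.length - k) k res le_rfl
  intro n
  induction n with
  | zero =>
      intro k res hn
      rw [modaLoop, dif_neg (by simp only [PySem.List.len_eq]; omega)]
      rw [pyRange50_nil _ _ (by omega)]
      simp
  | succ n ih =>
      intro k res hn
      by_cases hk : k < list.length
      · rw [modaLoop, dif_pos (by simp only [PySem.List.len_eq]; exact_mod_cast hk)]
        rw [ih (k + 50) _ (by omega)]
        rw [pyRange50_cons (k : Int) _ (by exact_mod_cast hk)]
        have hcast : ((k : Int) + 50) = ((k + 50 : Nat) : Int) := by push_cast; ring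
        rw [hcast]
        simp
      · rw [modaLoop, dif_neg (by simp only [PySem.List.len_eq]; omega)]
        rw [pyRange50_nil _ _ (by omega)]
        simp

lemma alt_eq (list : List Int) : moda_alt list
    = (PySem.List.pyRange 0 (list.length : Int) 50).map
        (fun j => modaAltBody (PySem.List.slice list (some j) (some (j + 49)))) := by
  show (PySem.List.pyRange 0 (PySem.List.len list) 50).foldl
      (fun res k => res ++ [modaAltBody (PySem.List.slice list (some k) (some (k + 49)))])
      [] = _
  rw [PySem.List.len_eq]
  simpa using PySem.List.foldl_append_singleton_eq_map
    (fun k => modaAltBody (PySem.List.slice list (some k) (some (k + 49))))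
    (PySem.List.pyRange 0 (list.length : Int) 50) []

lemma slice_ne_nil (list : List Int) (j : Int) (h0 : 0 ≤ j) (h1 : j < (list.length : Int)) :
    PySem.List.slice list (some j) (some (j + 49)) ≠ [] := by
  rw [PySem.List.slice_toNat _ h0 (by omega)]
  intro habs
  have h49 : (j + 49).toNat - j.toNat = 49 := by omega
  rw [h49, List.take_eq_nil_iff] at habs
  rcases habs with habs | habs
  · exact absurd habs (by norm_num)
  · rw [List.drop_eq_nil_iff] at habs
    omega

-- ===== VERDICT (by name: the statement is the Claim_ definition above) =====
theorem moda_spec : Claim_equal_moda := by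
  intro list _
  unfold Spec_moda
  show modaLoop list 0 [] = moda_alt list
  rw [loop_eq, alt_eq]
  simp only [List.nil_append, Nat.cast_zero]
  refine List.map_congr_left ?_
  intro j hj
  obtain ⟨hj0, hj1, -⟩ := (PySem.List.mem_pyRange_iff_of_pos (by norm_num) j).mp hj
  exact body_eq _ (slice_ne_nil list j hj0 hj1)
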